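-- pv_equiv track=rewrite | github.com/kleenex1/TIL | 코테의민족/1119/01.py | solution
-- ===== SOURCE A (Python) =====
-- def solution(number):
--     answer = []
--     for i in range(0, len(number)):
--         for j in range(i+1, len(number)):
--             for k in range(j+1, len(number)):
--                 if number[i] + number[j] + number[k] == 0:
--                     answer.append([number[i],number[j],number[k]])
--
--     return len(answer)
-- ===== SOURCE B (Python) =====
-- def solution(number):
--     # One left-to-right pass: pair_sums counts sums of pairs among earlier
--     # elements; each new element closes pair_sums[-x] triples.
--     pair_sums = {}
--     seen = []
--     answer = 0
--     for x in number:
--         answer += pair_sums.get(-x, 0)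
--         for y in seen:
--             s = x + y
--             pair_sums[s] = pair_sums.get(s, 0) + 1
--         seen.append(x)
--     return answer
-- ===== Notes on version B (the rewrite author's own statement) =====
-- stated objective: faster
-- what changed: Replaces the O(n^3) triple index loop with a single left-to-right pass maintaining a dict counting sums of pairs of earlier elements; each new element x closes pair_sums.get(-x,0) triples.
import Mathlib
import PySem

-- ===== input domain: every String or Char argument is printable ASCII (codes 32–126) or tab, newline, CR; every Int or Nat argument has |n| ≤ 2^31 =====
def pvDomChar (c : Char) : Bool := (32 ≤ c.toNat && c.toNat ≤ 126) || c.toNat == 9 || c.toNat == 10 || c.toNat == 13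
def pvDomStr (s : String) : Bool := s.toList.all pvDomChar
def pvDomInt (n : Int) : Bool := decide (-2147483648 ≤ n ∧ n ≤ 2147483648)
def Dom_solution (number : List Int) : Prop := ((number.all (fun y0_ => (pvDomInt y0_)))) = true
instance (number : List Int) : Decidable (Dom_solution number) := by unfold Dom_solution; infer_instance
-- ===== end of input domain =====

-- B replaces A's O(n^3) triple index loop by one pass with a counter of pair sums of earlier elements.

-- ===== PORT A =====
-- literal transliteration of A's triple nested range loop collecting the matching triples
def solution (number : List Int) : Int :=
  ((PySem.List.pyRange 0 (PySem.List.len number) 1).foldl (fun acc i =>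
    (PySem.List.pyRange (i + 1) (PySem.List.len number) 1).foldl (fun acc j =>
      (PySem.List.pyRange (j + 1) (PySem.List.len number) 1).foldl (fun acc k =>
        if PySem.List.pyGetD number i 0 + PySem.List.pyGetD number j 0 + PySem.List.pyGetD number k 0 == 0
        then acc ++ [[PySem.List.pyGetD number i 0, PySem.List.pyGetD number j 0, PySem.List.pyGetD number k 0]]
        else acc) acc) acc) ([] : List (List Int))).length

-- ===== PORT B =====
-- transliteration of Source B: fold over number with state (pair_sums, seen, answer)
def solution_alt (number : List Int) : Int :=
  (number.foldl (fun st x =>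
      let ans := st.2.2 + st.1.getD (-x) 0
      let ps := st.2.1.foldl (fun d y => d.modify (x + y) 0 (· + 1)) st.1
      (ps, st.2.1 ++ [x], ans))
    ((PySem.Dict.empty : PySem.Dict Int Int), ([] : List Int), (0 : Int))).2.2

-- ===== PRECONDITION & SPEC =====
def Spec_solution (number : List Int) (out : Int) : Prop := out = solution_alt number
instance (number : List Int) (out : Int) : Decidable (Spec_solution number out) := by unfold Spec_solution; infer_instance

-- ===== CLAIM (what is proved, stated in full; the proofs are below) =====
def Claim_equal_solution : Prop := ∀ (number : List Int), Dom_solution number → Spec_solution number (solution number)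

-- ===== LEMMAS AND PROOFS =====

-- number of pairs p < q with l[p] + l[q] = s
def pairCnt : List Int → Int → Nat
  | [], _ => 0
  | y :: t, s => t.count (s - y) + pairCnt t s

-- number of triples p < q < r with zero sum
def tripCnt : List Int → Nat
  | [] => 0
  | y :: t => pairCnt t (-y) + tripCnt t

-- "for each element y with its strict suffix u, emit G y u" — shape of A's loops
def tailsF {β : Type} : List Int → (Int → List Int → List β) → List β
  | [], _ => []
  | y :: t, G => G y t ++ tailsF t G

-- the inner loop body of A, per first element x
def GinnerA (x : Int) : Int → List Int → List (List Int) :=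
  fun y u => (u.filter (fun v => x + y + v == 0)).map (fun v => [x, y, v])

-- the outer loop body of A
def GoutA : Int → List Int → List (List Int) :=
  fun x t => tailsF t (GinnerA x)

theorem count_map_add (x s : Int) (u : List Int) :
    (u.map (fun y => x + y)).count s = u.count (s - x) := by
  induction u with
  | nil => rfl
  | cons y t ih =>
      simp only [List.map_cons, List.count_cons, ih]
      have : (x + y == s) = (y == s - x) := by
        by_cases h : y = s - x <;> (simp [h]; try omega)
      rw [this]

theorem pairCnt_snoc (p : List Int) (x s : Int) :
    pairCnt (p ++ [x]) s = pairCnt p s + p.count (s - x) := by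
  induction p with
  | nil => simp [pairCnt]
  | cons y t ih =>
      simp only [List.cons_append, pairCnt, ih, List.count_append, List.count_cons,
        List.count_nil]
      have : (x == s - y) = (y == s - x) := by
        by_cases h : y = s - x <;> (simp [h]; try omega)
      rw [this]; omega

theorem tripCnt_snoc (p : List Int) (x : Int) :
    tripCnt (p ++ [x]) = tripCnt p + pairCnt p (-x) := by
  induction p with
  | nil => simp [tripCnt, pairCnt]
  | cons y t ih =>
      simp only [List.cons_append, tripCnt, pairCnt, ih, pairCnt_snoc]
      have : (-y - x) = (-x - y) := by omega
      rw [this]; omega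

theorem filter_len (x y : Int) (u : List Int) :
    (u.filter (fun v => x + y + v == 0)).length = u.count (-x - y) := by
  rw [List.count_eq_countP, ← List.countP_eq_length_filter]
  apply List.countP_congr
  intro v _
  by_cases h : v = -x - y <;> (simp [h]; try omega)

-- a flatMap over range(a, len l) whose body uses l[j] and the suffix after j IS tailsF on drop a
theorem flatRange {β : Type} (l : List Int) (G : Int → List Int → List β) :
    ∀ (n : Nat) (a : Int), 0 ≤ a → n = l.length - a.toNat →
      (PySem.List.pyRange a (PySem.List.len l) 1).flatMap
          (fun j => G (PySem.List.pyGetD l j 0) (l.drop (j + 1).toNat))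
        = tailsF (l.drop a.toNat) G := by
  intro n
  induction n with
  | zero =>
      intro a ha hn
      have hle : l.length ≤ a.toNat := by omega
      rw [PySem.List.pyRange_one_eq_nil (by simp [PySem.List.len]; omega),
        List.drop_eq_nil_of_le hle]
      rfl
  | succ m ih =>
      intro a ha hn
      have hlt : a.toNat < l.length := by omega
      have hlt' : a < PySem.List.len l := by simp [PySem.List.len]; omega
      rw [PySem.List.pyRange_one_cons hlt', List.flatMap_cons,
        ih (a + 1) (by omega) (by omega)]
      have hdrop : l.drop a.toNat = l[a.toNat] :: l.drop (a.toNat + 1) :=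
        List.drop_eq_getElem_cons hlt
      have hget : PySem.List.pyGetD l a 0 = l[a.toNat] :=
        PySem.List.pyGetD_eq_getElem (xs := l) (i := a) (d := 0) ha (by omega)
      have h1 : (a + 1).toNat = a.toNat + 1 := by omega
      rw [hdrop, h1, tailsF, hget]

theorem lenA_inner (x : Int) (t : List Int) :
    (tailsF t (GinnerA x)).length = pairCnt t (-x) := by
  induction t with
  | nil => rfl
  | cons y u ih =>
      simp only [tailsF, GinnerA, List.length_append, List.length_map, ih, pairCnt, filter_len]

theorem lenA_outer (l : List Int) : (tailsF l GoutA).length = tripCnt l := by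
  induction l with
  | nil => rfl
  | cons x t ih =>
      simp only [tailsF, GoutA, List.length_append, ih, tripCnt, lenA_inner]

theorem solution_eq_tripCnt (l : List Int) : solution l = (tripCnt l : Int) := by
  unfold solution
  have houter : ∀ (acc : List (List Int)), ∀ i ∈ PySem.List.pyRange 0 (PySem.List.len l) 1,
      (PySem.List.pyRange (i + 1) (PySem.List.len l) 1).foldl (fun acc j =>
        (PySem.List.pyRange (j + 1) (PySem.List.len l) 1).foldl (fun acc k =>
          if PySem.List.pyGetD l i 0 + PySem.List.pyGetD l j 0 + PySem.List.pyGetD l k 0 == 0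
          then acc ++ [[PySem.List.pyGetD l i 0, PySem.List.pyGetD l j 0, PySem.List.pyGetD l k 0]]
          else acc) acc) acc
      = acc ++ GoutA (PySem.List.pyGetD l i 0) (l.drop (i + 1).toNat) := by
    intro acc i hi
    have hmid : ∀ (acc : List (List Int)), ∀ j ∈ PySem.List.pyRange (i + 1) (PySem.List.len l) 1,
        (PySem.List.pyRange (j + 1) (PySem.List.len l) 1).foldl (fun acc k =>
          if PySem.List.pyGetD l i 0 + PySem.List.pyGetD l j 0 + PySem.List.pyGetD l k 0 == 0
          then acc ++ [[PySem.List.pyGetD l i 0, PySem.List.pyGetD l j 0, PySem.List.pyGetD l k 0]]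
          else acc) acc
        = acc ++ GinnerA (PySem.List.pyGetD l i 0) (PySem.List.pyGetD l j 0) (l.drop (j + 1).toNat) := by
      intro acc j hj
      have hj0 : 0 ≤ j + 1 := by
        have h1 := (PySem.List.mem_pyRange_one.mp hj).1
        have h2 := (PySem.List.mem_pyRange_one.mp hi).1
        omega
      exact (PySem.List.foldl_pyRange_pyGetD l 0
        (fun acc v => if PySem.List.pyGetD l i 0 + PySem.List.pyGetD l j 0 + v == 0
          then acc ++ [[PySem.List.pyGetD l i 0, PySem.List.pyGetD l j 0, v]] else acc) acc hj0).trans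
        (PySem.List.foldl_append_if _ _ _ _)
    refine (PySem.List.foldl_congr_mem _ _ (fun acc j => acc ++
        GinnerA (PySem.List.pyGetD l i 0) (PySem.List.pyGetD l j 0) (l.drop (j + 1).toNat)) _ hmid).trans ?_
    refine (PySem.List.foldl_append_eq_flatMap _ _ _).trans ?_
    have h2 := (PySem.List.mem_pyRange_one.mp hi).1
    rw [flatRange l (GinnerA (PySem.List.pyGetD l i 0)) (l.length - (i + 1).toNat) (i + 1) (by omega) rfl]
    rfl
  have key : ∀ (X : List (List Int)), X = tailsF l GoutA → (X.length : Int) = (tripCnt l : Int) := by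
    intro X hX
    rw [hX, lenA_outer]
  refine key _ ?_
  refine (PySem.List.foldl_congr_mem _ _ (fun acc i => acc ++
      GoutA (PySem.List.pyGetD l i 0) (l.drop (i + 1).toNat)) _ houter).trans ?_
  refine (PySem.List.foldl_append_eq_flatMap _ _ _).trans ?_
  rw [flatRange l GoutA (l.length - (0 : Int).toNat) 0 le_rfl rfl]
  simp

theorem ps_step (seen : List Int) (x : Int) (ps : PySem.Dict Int Int) (s : Int) :
    (seen.foldl (fun d y => d.modify (x + y) 0 (· + 1)) ps).getD s 0
      = ps.getD s 0 + (seen.count (s - x) : Int) := by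
  have h : seen.foldl (fun d y => d.modify (x + y) 0 (· + 1)) ps
      = (seen.map (fun y => x + y)).foldl (fun d k => d.modify k 0 (· + 1)) ps := by
    rw [List.foldl_map]
  rw [h, PySem.Dict.getD_foldl_modify_add_one, count_map_add]

theorem B_inv (l : List Int) :
    ∀ (ps : PySem.Dict Int Int) (seen : List Int) (ans : Int),
      (∀ s, ps.getD s 0 = (pairCnt seen s : Int)) →
      (l.foldl (fun st x =>
          let ans := st.2.2 + st.1.getD (-x) 0
          let ps := st.2.1.foldl (fun d y => d.modify (x + y) 0 (· + 1)) st.1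
          (ps, st.2.1 ++ [x], ans)) (ps, seen, ans)).2.2
        = ans + (tripCnt (seen ++ l) : Int) - (tripCnt seen : Int) := by
  induction l with
  | nil => intro ps seen ans _; simp
  | cons x t ih =>
      intro ps seen ans hinv
      simp only [List.foldl_cons]
      rw [ih _ (seen ++ [x]) _ ?_]
      · rw [hinv (-x), tripCnt_snoc]
        have : seen ++ [x] ++ t = seen ++ (x :: t) := by simp
        rw [this]
        push_cast
        ring
      · intro s
        rw [ps_step, hinv s, pairCnt_snoc]
        push_cast
        ring

-- ===== VERDICT (by name: the statement is the Claim_ definition above) =====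
theorem solution_spec : Claim_equal_solution := by
  intro number _
  unfold Spec_solution
  rw [solution_eq_tripCnt]
  unfold solution_alt
  rw [B_inv number PySem.Dict.empty [] 0 (fun s => by simp [PySem.Dict.getD_empty, pairCnt])]
  simp [tripCnt]
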